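-- pv_equiv track=rewrite | github.com/gamesguru/hackerrank-interview-prep | unknown/sos.py | marsExploration
-- ===== SOURCE A (Python) =====
-- def marsExploration(s):
--
--     nums = [3 * i for i in range(len(s) // 3)]
--     arr = [s[i : i + 3] for i in nums]
--
--     n = 0
--     for e in arr:
--         # if e == "SOS":
--         #     continue
--         if e[0] != "S":
--             n += 1
--         if e[1] != "O":
--             n += 1
--         if e[2] != "S":
--             n += 1
--     return n
-- ===== SOURCE B (Python) =====
-- def marsExploration(s):
--     m = 3 * (len(s) // 3)
--     return sum(s[i] != "SOS"[i % 3] for i in range(m))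
-- ===== Notes on version B (the rewrite author's own statement) =====
-- stated objective: idiomatic
-- what changed: Replaced the triple-slicing loop with three per-position branches by a single flat scan over the truncated prefix comparing each character to the cyclic pattern 'SOS'[i % 3], summed in one expression.
import Mathlib
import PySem

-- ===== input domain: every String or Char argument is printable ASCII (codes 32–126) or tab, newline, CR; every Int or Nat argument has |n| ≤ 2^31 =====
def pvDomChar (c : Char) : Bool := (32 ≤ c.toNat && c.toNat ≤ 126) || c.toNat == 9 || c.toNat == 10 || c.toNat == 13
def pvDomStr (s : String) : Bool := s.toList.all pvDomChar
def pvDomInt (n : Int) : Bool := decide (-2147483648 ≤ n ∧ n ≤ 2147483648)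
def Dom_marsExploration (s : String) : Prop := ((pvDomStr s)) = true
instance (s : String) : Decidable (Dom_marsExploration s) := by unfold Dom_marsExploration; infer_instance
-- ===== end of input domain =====

-- B replaces A's chunk-into-triples loop by one flat scan against the cyclic pattern 'SOS'[i % 3] (idiomatic; same cost).

-- ===== PORT A =====
-- chunks are always exactly 3 long, so e[0]/e[1]/e[2] never raise; pyGetD's default is unreachable
def marsExploration (s : String) : Int :=
  let l := s.toList
  let nums := (PySem.List.pyRange 0 (PySem.Int.floordiv (PySem.Str.len s) 3) 1).map (fun i => 3 * i)
  let arr := nums.map (fun i => PySem.List.slice l (some i) (some (i + 3)))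
  arr.foldl (fun n e =>
    let n := if PySem.List.pyGetD e 0 ' ' ≠ 'S' then n + 1 else n
    let n := if PySem.List.pyGetD e 1 ' ' ≠ 'O' then n + 1 else n
    if PySem.List.pyGetD e 2 ' ' ≠ 'S' then n + 1 else n) 0

-- ===== PORT B =====
def sosPat : List Char := ['S', 'O', 'S']

def marsExploration_alt (s : String) : Int :=
  let l := s.toList
  let m := 3 * PySem.Int.floordiv (PySem.Str.len s) 3
  ((PySem.List.pyRange 0 m 1).map (fun i =>
      if PySem.List.pyGetD l i ' ' ≠ PySem.List.pyGetD sosPat (PySem.Int.mod i 3) ' '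
      then (1 : Int) else 0)).sum

-- ===== PRECONDITION & SPEC =====
def Spec_marsExploration (s : String) (out : Int) : Prop := out = marsExploration_alt s
instance (s : String) (out : Int) : Decidable (Spec_marsExploration s out) := by unfold Spec_marsExploration; infer_instance

-- ===== CLAIM (what is proved, stated in full; the proofs are below) =====
def Claim_equal_marsExploration : Prop := ∀ (s : String), Dom_marsExploration s → Spec_marsExploration s (marsExploration s)

-- ===== LEMMAS AND PROOFS =====

/-- A's per-chunk contribution. -/
def chunkCount (e : List Char) : Int :=
  (if PySem.List.pyGetD e 0 ' ' ≠ 'S' then (1:Int) else 0)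
  + (if PySem.List.pyGetD e 1 ' ' ≠ 'O' then (1:Int) else 0)
  + (if PySem.List.pyGetD e 2 ' ' ≠ 'S' then (1:Int) else 0)

/-- B's per-position contribution. -/
def bterm (l : List Char) (i : Int) : Int :=
  if PySem.List.pyGetD l i ' ' ≠ PySem.List.pyGetD sosPat (PySem.Int.mod i 3) ' ' then 1 else 0

lemma chunk_eq (l : List Char) (q : Nat) (h : 3 * q + 3 ≤ l.length) :
    chunkCount (PySem.List.slice l (some (3 * (q:Int))) (some (3 * (q:Int) + 3)))
      = bterm l (3 * (q:Int)) + bterm l (3 * (q:Int) + 1) + bterm l (3 * (q:Int) + 2) := by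
  have hs : PySem.List.slice l (some (3 * (q:Int))) (some (3 * (q:Int) + 3))
      = (l.drop ((3 * (q:Int)).toNat)).take ((3 * (q:Int) + 3).toNat - (3 * (q:Int)).toNat) :=
    PySem.List.slice_toNat l (by positivity) (by positivity)
  have ht : (3 * (q:Int)).toNat = 3 * q := by omega
  have ht3 : (3 * (q:Int) + 3).toNat - (3 * (q:Int)).toNat = 3 := by omega
  rw [ht3, ht] at hs
  have hlen : ((l.drop (3*q)).take 3).length = 3 := by
    simp; omega
  have m0 : PySem.Int.mod (3 * (q:Int)) 3 = 0 := by
    have := PySem.Int.mod_natCast (3*q) 3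
    have e : ((3*q : Nat) : Int) = 3 * (q:Int) := by push_cast; ring
    rw [e, show (3*q) % 3 = 0 by omega] at this
    exact_mod_cast this
  have m1 : PySem.Int.mod (3 * (q:Int) + 1) 3 = 1 := by
    have := PySem.Int.mod_natCast (3*q+1) 3
    have e : ((3*q+1 : Nat) : Int) = 3 * (q:Int) + 1 := by push_cast; ring
    rw [e, show (3*q+1) % 3 = 1 by omega] at this
    exact_mod_cast this
  have m2 : PySem.Int.mod (3 * (q:Int) + 2) 3 = 2 := by
    have := PySem.Int.mod_natCast (3*q+2) 3
    have e : ((3*q+2 : Nat) : Int) = 3 * (q:Int) + 2 := by push_cast; ring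
    rw [e, show (3*q+2) % 3 = 2 by omega] at this
    exact_mod_cast this
  unfold chunkCount bterm
  rw [hs, m0, m1, m2]
  rw [PySem.List.pyGetD_eq_getElem _ ' ' (by norm_num) (by rw [hlen]; norm_num),
      PySem.List.pyGetD_eq_getElem _ ' ' (by norm_num) (by rw [hlen]; norm_num),
      PySem.List.pyGetD_eq_getElem _ ' ' (by norm_num) (by rw [hlen]; norm_num),
      PySem.List.pyGetD_eq_getElem l ' ' (by positivity) (by omega),
      PySem.List.pyGetD_eq_getElem l ' ' (by positivity) (by omega),
      PySem.List.pyGetD_eq_getElem l ' ' (by positivity) (by omega)]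
  have g : ∀ (j : Nat) (hj : j < 3),
      ((l.drop (3*q)).take 3)[j]'(by rw [hlen]; omega) = l[3*q+j]'(by omega) := by
    intro j hj
    simp [List.getElem_take, List.getElem_drop]
  have t0 : ((3 : Int) * (q:Int)).toNat = 3*q+0 := by omega
  have t1 : ((3 : Int) * (q:Int) + 1).toNat = 3*q+1 := by omega
  have t2 : ((3 : Int) * (q:Int) + 2).toNat = 3*q+2 := by omega
  norm_num [t0, t1, t2, show (0:Int).toNat = 0 from rfl, show (1:Int).toNat = 1 from rfl,
    show (2:Int).toNat = 2 from rfl, g 0 (by omega), g 1 (by omega), g 2 (by omega)]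
  simp [show PySem.List.pyGetD sosPat 0 ' ' = 'S' from rfl,
    show PySem.List.pyGetD sosPat 1 ' ' = 'O' from rfl,
    show PySem.List.pyGetD sosPat 2 ' ' = 'S' from rfl]

lemma sum_key (l : List Char) (q : Nat) (h : 3 * q ≤ l.length) :
    ((PySem.List.pyRange 0 (q:Int) 1).map
        (fun i => chunkCount (PySem.List.slice l (some (3*i)) (some (3*i + 3))))).sum
    = ((PySem.List.pyRange 0 (3*(q:Int)) 1).map (fun i => bterm l i)).sum := by
  induction q with
  | zero => simp [PySem.List.pyRange]
  | succ q ih =>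
    have hq : 3 * q ≤ l.length := by omega
    have splitA : PySem.List.pyRange 0 ((q:Int)+1) 1
        = PySem.List.pyRange 0 (q:Int) 1 ++ [(q:Int)] :=
      PySem.List.pyRange_one_succ_right (by positivity)
    have splitB : PySem.List.pyRange 0 (3*((q:Int)+1)) 1
        = PySem.List.pyRange 0 (3*(q:Int)) 1 ++ [3*(q:Int), 3*(q:Int)+1, 3*(q:Int)+2] := by
      rw [PySem.List.pyRange_one_append 0 (3*(q:Int)) (3*((q:Int)+1)) (by positivity) (by omega)]
      congr 1
      rw [show 3*((q:Int)+1) = (3*(q:Int)+2) + 1 by ring,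
          PySem.List.pyRange_one_succ_right (by omega),
          show (3*(q:Int)+2 : Int) = (3*(q:Int)+1) + 1 by ring,
          PySem.List.pyRange_one_succ_right (by omega),
          show (3*(q:Int)+1 : Int) = (3*(q:Int)) + 1 by ring,
          PySem.List.pyRange_one_singleton]
      simp
    push_cast
    rw [splitA, splitB]
    simp only [List.map_append, List.sum_append, List.map_cons, List.map_nil, List.sum_cons,
      List.sum_nil]
    rw [ih hq, chunk_eq l q h]
    ring

lemma floordiv_len (l : List Char) :
    PySem.Int.floordiv (l.length : Int) 3 = ((l.length / 3 : Nat) : Int) := by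
  exact_mod_cast PySem.Int.floordiv_natCast l.length 3

lemma A_as_sum (s : String) :
    marsExploration s
      = ((PySem.List.pyRange 0 ((s.toList.length / 3 : Nat) : Int) 1).map
          (fun i => chunkCount (PySem.List.slice s.toList (some (3*i)) (some (3*i + 3))))).sum := by
  show (((PySem.List.pyRange 0 (PySem.Int.floordiv (PySem.Str.len s) 3) 1).map (fun i => 3 * i)).map
          (fun i => PySem.List.slice s.toList (some i) (some (i + 3)))).foldl
        (fun n e =>
          let n := if PySem.List.pyGetD e 0 ' ' ≠ 'S' then n + 1 else n
          let n := if PySem.List.pyGetD e 1 ' ' ≠ 'O' then n + 1 else n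
          if PySem.List.pyGetD e 2 ' ' ≠ 'S' then n + 1 else n) 0 = _
  rw [PySem.Str.len_eq, floordiv_len]
  have hbody : (fun (n : Int) (e : List Char) =>
          let n := if PySem.List.pyGetD e 0 ' ' ≠ 'S' then n + 1 else n
          let n := if PySem.List.pyGetD e 1 ' ' ≠ 'O' then n + 1 else n
          if PySem.List.pyGetD e 2 ' ' ≠ 'S' then n + 1 else n)
      = fun n e => n + chunkCount e := by
    funext n e
    simp only [chunkCount]
    split_ifs <;> ring
  rw [hbody, PySem.List.foldl_add, List.map_map, List.map_map]
  simp only [Function.comp_def]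
  norm_num

-- ===== VERDICT (by name: the statement is the Claim_ definition above) =====
theorem marsExploration_spec : Claim_equal_marsExploration := by
  intro s _
  show marsExploration s
      = ((PySem.List.pyRange 0 (3 * PySem.Int.floordiv (PySem.Str.len s) 3) 1).map
          (fun i => bterm s.toList i)).sum
  rw [A_as_sum, PySem.Str.len_eq, floordiv_len]
  exact sum_key s.toList (s.toList.length / 3) (by omega)
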